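-- pv_equiv track=rewrite | github.com/sharejing/Takin | takin/text_cleaning.py | delete_extra_whitespace
-- ===== SOURCE A (Python) =====
-- from string import punctuation
--
-- def delete_extra_whitespace(text, lang="zh"):
--     """
--     @Desc: 删除文本中的多余空白
--     @Args:
--         text: 指定文本
--         lang: 该文本对应的语言
--     @Returns:
--         删除后的文本
--     """
--     if lang == "zh":
--         return "".join(text.split())
--     else:
--         list_text = list(" ".join(text.split()))
--         for index, ele in enumerate(list_text):
--             if index != 0 and ele in punctuation:
--                 if list_text[index-1] == " ":
--                     list_text[index-1] = ""
--         return "".join(list_text)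
-- ===== SOURCE B (Python) =====
-- from string import punctuation
--
-- def delete_extra_whitespace(text, lang="zh"):
--     if lang == "zh":
--         return "".join(text.split())
--     out = []
--     for tok in text.split():
--         if out and tok[0] not in punctuation:
--             out.append(" ")
--         out.append(tok)
--     return "".join(out)
-- ===== Notes on version B (the rewrite author's own statement) =====
-- stated objective: simpler
-- what changed: B decides spacing at token boundaries while joining the split tokens in one forward pass, instead of joining with spaces first and then post-editing a per-character list of 1-char strings by index to blank out spaces that precede punctuation.
import Mathlib
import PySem

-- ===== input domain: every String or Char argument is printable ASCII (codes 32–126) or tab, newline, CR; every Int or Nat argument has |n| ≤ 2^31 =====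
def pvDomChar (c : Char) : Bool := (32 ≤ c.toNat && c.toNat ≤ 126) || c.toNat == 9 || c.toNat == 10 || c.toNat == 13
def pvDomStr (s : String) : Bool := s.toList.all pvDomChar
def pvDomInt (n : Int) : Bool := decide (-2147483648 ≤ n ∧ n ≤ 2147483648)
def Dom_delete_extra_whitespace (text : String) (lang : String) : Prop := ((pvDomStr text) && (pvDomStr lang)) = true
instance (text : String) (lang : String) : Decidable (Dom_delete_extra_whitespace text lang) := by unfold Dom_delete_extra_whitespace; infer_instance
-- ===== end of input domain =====

-- B joins the split tokens in one forward pass, deciding at each token boundary whether to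
-- emit a separating space, instead of A's join-then-post-edit of a per-character list (objective: simpler).

-- ===== PORT A =====
-- string.punctuation
def pyPunctuation : String := "!\"#$%&'()*+,-./:;<=>?@[\\]^_`{|}~"

-- the 'for index, ele in enumerate(list_text)' loop; Python enumerates the live list and
-- only ever writes at position index-1, so reading lt[i] from the current state is exact
def dewFixLoop (lt : List String) (i : Nat) : List String :=
  if _h : i < lt.length then
    let ele := lt.getD i ""
    let lt' := if i ≠ 0 && PySem.Str.isIn ele pyPunctuation && (lt.getD (i - 1) "" == " ")
      then lt.set (i - 1) "" else lt
    dewFixLoop lt' (i + 1)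
  else lt
termination_by lt.length - i
decreasing_by
  split
  · simp only [List.length_set]; omega
  · omega

def delete_extra_whitespace (text : String) (lang : String) : String :=
  if lang == "zh" then
    PySem.Str.join "" (PySem.Str.split₀ text)
  else
    let list_text := (PySem.Str.join " " (PySem.Str.split₀ text)).toList.map
      (fun c => String.ofList [c])
    PySem.Str.join "" (dewFixLoop list_text 0)

-- ===== PORT B =====
-- one loop step: append a separating space (unless the token starts with punctuation
-- or nothing has been emitted yet), then the token; tok[0] is tok.toList.headD
-- (split tokens are never empty, so the default is never the decided value)
def dewAddTok (out : List String) (tok : String) : List String :=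
  let out' := if out ≠ [] && !(PySem.Str.isIn (String.ofList [tok.toList.headD ' ']) pyPunctuation)
    then out ++ [" "] else out
  out' ++ [tok]

def delete_extra_whitespace_alt (text : String) (lang : String) : String :=
  if lang == "zh" then
    PySem.Str.join "" (PySem.Str.split₀ text)
  else
    PySem.Str.join "" ((PySem.Str.split₀ text).foldl dewAddTok [])

-- ===== PRECONDITION & SPEC =====
def Spec_delete_extra_whitespace (text : String) (lang : String) (out : String) : Prop := out = delete_extra_whitespace_alt text lang
instance (text : String) (lang : String) (out : String) : Decidable (Spec_delete_extra_whitespace text lang out) := by unfold Spec_delete_extra_whitespace; infer_instance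

-- ===== CLAIM (what is proved, stated in full; the proofs are below) =====
def Claim_equal_delete_extra_whitespace : Prop := ∀ (text : String) (lang : String), Dom_delete_extra_whitespace text lang → Spec_delete_extra_whitespace text lang (delete_extra_whitespace text lang)

-- ===== LEMMAS AND PROOFS =====

-- proof-side views of the two computations
def punctL : List Char := pyPunctuation.toList

-- what A's index loop leaves in the list, seen from position 1 with previous char p
def fix2 : Char → List Char → List String
  | p, [] => [String.ofList [p]]
  | p, c :: rest => (if c ∈ punctL ∧ p = ' ' then "" else String.ofList [p]) :: fix2 c rest

-- the characters of A's result, given the previous character p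
def charFix : Char → List Char → List Char
  | p, [] => [p]
  | p, c :: rest => (if c ∈ punctL ∧ p = ' ' then [] else [p]) ++ charFix c rest

def sepTail (ts : List (List Char)) : List Char := ts.flatMap (fun t => ' ' :: t)

def bTailC (ts : List (List Char)) : List Char :=
  ts.flatMap (fun t => if t.headD ' ' ∈ punctL then t else ' ' :: t)

lemma dropLast_getLastD (cs : List Char) (c : Char) :
    (c :: cs).dropLast ++ [cs.getLastD c] = c :: cs := by
  induction cs generalizing c with
  | nil => simp
  | cons b bs ih =>
    rw [List.getLastD_cons, show (c::b::bs).dropLast = c :: (b::bs).dropLast from rfl,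
      List.cons_append, ih]

lemma dropLast_getLast?_append (cs : List Char) (c : Char) (X : List Char) :
    (c :: cs).dropLast ++ ((cs.getLast?.getD c) :: X) = c :: (cs ++ X) := by
  induction cs generalizing c with
  | nil => simp
  | cons b bs ih =>
    rw [show (c::b::bs).dropLast = c :: (b::bs).dropLast from rfl,
      show (b::bs).getLast? = bs.getLast?.orElse (fun _ => some b) from ?_, List.cons_append]
    · rcases hbs : bs.getLast? with _ | x <;> simp [hbs] at ih ⊢ <;> rw [ih b] <;> simp [hbs]
    · rcases hbs : bs.getLast? with _ | x <;> simp [List.getLast?_cons, hbs]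

lemma isIn_singleton (c : Char) :
    PySem.Str.isIn (String.ofList [c]) pyPunctuation = decide (c ∈ punctL) := by
  by_cases h : c ∈ punctL
  · have h1 : PySem.Str.isIn (String.ofList [c]) pyPunctuation = true := by
      rw [PySem.Str.isIn_iff_infix, String.toList_ofList]
      obtain ⟨l1, l2, hl⟩ := List.append_of_mem h
      exact ⟨l1, l2, by show l1 ++ [c] ++ l2 = punctL; rw [hl]; simp⟩
    rw [h1]
    simp [h]
  · have h1 : PySem.Str.isIn (String.ofList [c]) pyPunctuation = false := by
      rw [Bool.eq_false_iff]
      intro hin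
      rw [PySem.Str.isIn_iff_infix, String.toList_ofList] at hin
      exact h (hin.sublist.subset (List.mem_singleton_self c))
    rw [h1]
    simp [h]

lemma singleton_beq_space (p : Char) : (String.ofList [p] == " ") = (p == ' ') := by
  by_cases h : p = ' '
  · subst h; decide
  · have h1 : (p == ' ') = false := by simp [h]
    rw [h1, beq_eq_false_iff_ne]
    intro heq
    have h2 := congrArg String.toList heq
    rw [String.toList_ofList, show (" ":String).toList = [' '] from by decide] at h2
    simp at h2
    exact h h2

lemma loop_fix2 (l : List Char) (D : List String) (p : Char) :
    dewFixLoop (D ++ String.ofList [p] :: l.map (fun c => String.ofList [c])) (D.length + 1)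
      = D ++ fix2 p l := by
  induction l generalizing D p with
  | nil =>
    rw [dewFixLoop, dif_neg (by simp)]
    simp [fix2]
  | cons c rest ih =>
    rw [dewFixLoop, dif_pos (by simp)]
    have hele : (D ++ String.ofList [p] :: (c :: rest).map (fun d => String.ofList [d])).getD
        (D.length + 1) "" = String.ofList [c] := by
      simp [List.getD, List.getElem?_append_right]
    have hprev : (D ++ String.ofList [p] :: (c :: rest).map (fun d => String.ofList [d])).getD
        (D.length + 1 - 1) "" = String.ofList [p] := by
      simp [List.getD, List.getElem?_append_right]
    simp only [hele, hprev, isIn_singleton, singleton_beq_space]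
    by_cases hcp : c ∈ punctL ∧ p = ' '
    · have hcond : (decide (D.length + 1 ≠ 0) && decide (c ∈ punctL) && (p == ' ')) = true := by
        simp [hcp.1, hcp.2]
      have hset : (D ++ String.ofList [p] :: (c :: rest).map (fun d => String.ofList [d])).set
          (D.length + 1 - 1) "" = (D ++ [""]) ++ String.ofList [c] :: rest.map (fun d => String.ofList [d]) := by
        simp [List.set_append]
      have hih := ih (D ++ [""]) c
      simp only [List.length_append, List.length_cons, List.length_nil] at hih
      rw [hcond, if_pos rfl, hset,
        show D.length + 1 + 1 = D.length + (0 + 1) + 1 from by omega, hih]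
      simp [fix2, hcp.1, hcp.2]
    · have hcond : (decide (D.length + 1 ≠ 0) && decide (c ∈ punctL) && (p == ' ')) = false := by
        rcases (not_and_or.1 hcp) with h | h <;> simp [h]
      have hre : D ++ String.ofList [p] :: (c :: rest).map (fun d => String.ofList [d])
          = (D ++ [String.ofList [p]]) ++ String.ofList [c] :: rest.map (fun d => String.ofList [d]) := by
        simp
      have hih := ih (D ++ [String.ofList [p]]) c
      simp only [List.length_append, List.length_cons, List.length_nil] at hih
      rw [hcond, if_neg (by simp), hre,
        show D.length + 1 + 1 = D.length + (0 + 1) + 1 from by omega, hih]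
      have he : fix2 p (c :: rest) = String.ofList [p] :: fix2 c rest := by
        rw [show fix2 p (c :: rest)
          = (if c ∈ punctL ∧ p = ' ' then "" else String.ofList [p]) :: fix2 c rest from rfl,
          if_neg hcp]
      rw [he]
      simp

lemma loop_start (c0 : Char) (rest : List Char) :
    dewFixLoop ((c0 :: rest).map (fun c => String.ofList [c])) 0 = fix2 c0 rest := by
  rw [dewFixLoop, dif_pos (by simp)]
  have hele0 : ((c0 :: rest).map (fun c => String.ofList [c])).getD 0 "" = String.ofList [c0] := by
    simp [List.getD]
  simp only [hele0, isIn_singleton, singleton_beq_space, Nat.zero_sub]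
  rw [if_neg (by simp)]
  have h := loop_fix2 rest [] c0
  simpa using h

lemma join_empty_sep (l : List (List Char)) : PySem.Chars.join [] l = l.flatten := by
  induction l with
  | nil => rw [PySem.Chars.join_nil]; rfl
  | cons a tl ih =>
    cases tl with
    | nil => rw [PySem.Chars.join_singleton]; simp
    | cons b tl2 =>
      rw [PySem.Chars.join_cons_cons, ih]
      simp

lemma flatten_fix2 (p : Char) (l : List Char) :
    ((fix2 p l).map String.toList).flatten = charFix p l := by
  induction l generalizing p with
  | nil => simp [fix2, charFix]
  | cons c rest ih =>
    simp only [fix2, charFix, List.map_cons, List.flatten_cons, ih]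
    split <;> simp

lemma split_go_tokens (s cur : List Char) (acc : List (List Char))
    (hcur : ∀ c ∈ cur, PySem.Chars.isspace c = false)
    (hacc : ∀ t ∈ acc, t ≠ [] ∧ ∀ c ∈ t, PySem.Chars.isspace c = false) :
    ∀ t ∈ PySem.Chars.split₀.go s cur acc, t ≠ [] ∧ ∀ c ∈ t, PySem.Chars.isspace c = false := by
  induction s generalizing cur acc with
  | nil =>
    intro t ht
    simp only [PySem.Chars.split₀.go] at ht
    split at ht
    · exact hacc t (by simpa using ht)
    · rw [List.mem_reverse] at ht
      rcases List.mem_cons.1 ht with h | h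
      · subst h
        rename_i hne
        constructor
        · simp only [List.isEmpty_iff] at hne
          simpa using hne
        · intro c hc; exact hcur c (by simpa using hc)
      · exact hacc t h
  | cons c rest ih =>
    intro t ht
    simp only [PySem.Chars.split₀.go] at ht
    by_cases hc : PySem.Chars.isspace c = true
    · rw [if_pos hc] at ht
      split at ht
      · exact ih [] acc (by simp) hacc t ht
      · refine ih [] (cur.reverse :: acc) (by simp) ?_ t ht
        intro u hu
        rcases List.mem_cons.1 hu with h | h
        · subst h
          rename_i hne
          refine ⟨by simpa using (by simpa using hne : ¬cur.isEmpty = true), ?_⟩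
          intro d hd; exact hcur d (by simpa using hd)
        · exact hacc u h
    · rw [if_neg hc] at ht
      refine ih (c :: cur) acc ?_ hacc t ht
      intro d hd
      rcases List.mem_cons.1 hd with h | h
      · subst h; exact Bool.not_eq_true _ ▸ (by simpa using hc)
      · exact hcur d h

lemma split_tokens (s : List Char) :
    ∀ t ∈ PySem.Chars.split₀ s, t ≠ [] ∧ ∀ c ∈ t, PySem.Chars.isspace c = false := by
  exact split_go_tokens s [] [] (by simp) (by simp)

lemma charFix_chunk (cs : List Char) (p : Char) (l : List Char)
    (hp : PySem.Chars.isspace p = false)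
    (hcs : ∀ c ∈ cs, PySem.Chars.isspace c = false) :
    charFix p (cs ++ l) = (p :: cs).dropLast ++ charFix (cs.getLastD p) l := by
  induction cs generalizing p with
  | nil => simp [charFix]
  | cons c cs' ih =>
    have hp' : p ≠ ' ' := by
      intro e; subst e
      rw [show PySem.Chars.isspace ' ' = true from by decide] at hp
      exact absurd hp (by simp)
    rw [List.cons_append, show charFix p (c :: (cs' ++ l))
        = (if c ∈ punctL ∧ p = ' ' then [] else [p]) ++ charFix c (cs' ++ l) from rfl,
      if_neg (by tauto), ih c (hcs c (by simp)) (fun d hd => hcs d (by simp [hd])),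
      List.getLastD_cons]
    rfl

lemma charFix_sepTail (ts : List (List Char)) (p : Char)
    (hp : PySem.Chars.isspace p = false)
    (hts : ∀ t ∈ ts, t ≠ [] ∧ ∀ c ∈ t, PySem.Chars.isspace c = false) :
    charFix p (sepTail ts) = p :: bTailC ts := by
  induction ts generalizing p with
  | nil => simp [sepTail, bTailC, charFix]
  | cons t ts' ih =>
    obtain ⟨htne, htsp⟩ := hts t (by simp)
    obtain ⟨c, cs, rfl⟩ : ∃ c cs, t = c :: cs := by
      cases t with
      | nil => exact absurd rfl htne
      | cons a as => exact ⟨a, as, rfl⟩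
    have hc : PySem.Chars.isspace c = false := htsp c (by simp)
    have hcs : ∀ d ∈ cs, PySem.Chars.isspace d = false := fun d hd => htsp d (by simp [hd])
    have hlast : PySem.Chars.isspace (cs.getLastD c) = false := by
      rcases List.mem_cons.1 (List.getLastD_mem_cons : cs.getLastD c ∈ c :: cs) with h | h
      · rw [h]; exact hc
      · exact hcs _ h
    have hstep : sepTail ((c :: cs) :: ts') = ' ' :: ((c :: cs) ++ sepTail ts') := by
      simp [sepTail]
    have e1 : charFix p (' ' :: ((c :: cs) ++ sepTail ts'))
        = p :: charFix ' ' ((c :: cs) ++ sepTail ts') := by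
      simp only [charFix]
      rw [if_neg (by intro h; exact absurd h.1 (by decide))]
      rfl
    have e2 : charFix ' ' ((c :: cs) ++ sepTail ts')
        = (if c ∈ punctL then [] else [' ']) ++ charFix c (cs ++ sepTail ts') := by
      rw [List.cons_append]
      simp only [charFix]
      congr 1
      simp
    rw [hstep, e1, e2, charFix_chunk cs c (sepTail ts') hc hcs,
      ih (cs.getLastD c) hlast (fun u hu => hts u (by simp [hu]))]
    by_cases hcp : c ∈ punctL <;>
      (simp [hcp, bTailC, List.append_assoc]; exact dropLast_getLast?_append cs c _)

lemma join_space (t : List Char) (ts : List (List Char)) :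
    PySem.Chars.join [' '] (t :: ts) = t ++ sepTail ts := by
  induction ts generalizing t with
  | nil => rw [PySem.Chars.join_singleton]; simp [sepTail]
  | cons q ts' ih =>
    rw [PySem.Chars.join_cons_cons, ih q]
    simp [sepTail]

lemma foldl_addTok (ts : List String) (acc : List String) (hacc : acc ≠ []) :
    ts.foldl dewAddTok acc
      = acc ++ ts.flatMap (fun s => if s.toList.headD ' ' ∈ punctL then [s] else [" ", s]) := by
  induction ts generalizing acc with
  | nil => simp
  | cons s ts' ih =>
    rw [List.foldl_cons]
    have hstep : dewAddTok acc s
        = acc ++ (if s.toList.headD ' ' ∈ punctL then [s] else [" ", s]) := by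
      unfold dewAddTok
      rw [isIn_singleton]
      by_cases h : s.toList.head?.getD ' ' ∈ punctL <;>
        simp [h, hacc]
    rw [hstep, ih _ (by simp [hacc])]
    by_cases h : s.toList.head?.getD ' ' ∈ punctL <;>
      simp [h, List.append_assoc]

lemma bTail_chars (ts : List (List Char)) :
    (((ts.map String.ofList).flatMap
        (fun s => if s.toList.headD ' ' ∈ punctL then [s] else [" ", s])).map String.toList).flatten
      = bTailC ts := by
  induction ts with
  | nil => simp [bTailC]
  | cons t ts ih =>
    have hbt : bTailC (t :: ts) = (if t.headD ' ' ∈ punctL then t else ' ' :: t) ++ bTailC ts := by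
      simp [bTailC]
    rw [List.map_cons, List.flatMap_cons, List.map_append, List.flatten_append, ih, hbt,
      String.toList_ofList]
    congr 1
    by_cases h : t.head?.getD ' ' ∈ punctL <;>
      simp [h, show (" ":String).toList = [' '] from by decide]

-- ===== VERDICT (by name: the statement is the Claim_ definition above) =====
theorem delete_extra_whitespace_spec : Claim_equal_delete_extra_whitespace := by
  intro text lang _
  unfold Spec_delete_extra_whitespace delete_extra_whitespace delete_extra_whitespace_alt
  by_cases hl : (lang == "zh") = true
  · simp [hl]
  · simp only [Bool.not_eq_true] at hl
    simp only [hl, Bool.false_eq_true, if_false]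
    have hsplit : PySem.Str.split₀ text = (PySem.Chars.split₀ text.toList).map String.ofList := rfl
    cases htss : PySem.Chars.split₀ text.toList with
    | nil =>
      rw [hsplit, htss]
      simp only [List.map_nil, List.foldl_nil]
      have hjoin : (PySem.Str.join " " ([] : List String)).toList = [] := by
        rw [PySem.Str.toList_join]
        simp [PySem.Chars.join_nil]
      rw [hjoin]
      simp only [List.map_nil]
      rw [dewFixLoop, dif_neg (by simp)]
    | cons t ts =>
      have htok : ∀ u ∈ t :: ts, u ≠ [] ∧ ∀ c ∈ u, PySem.Chars.isspace c = false := by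
        rw [← htss]; exact split_tokens text.toList
      obtain ⟨htne, htsp⟩ := htok t (by simp)
      obtain ⟨c, cs, rfl⟩ : ∃ c cs, t = c :: cs := by
        cases t with
        | nil => exact absurd rfl htne
        | cons a as => exact ⟨a, as, rfl⟩
      have hc : PySem.Chars.isspace c = false := htsp c (by simp)
      have hcs : ∀ d ∈ cs, PySem.Chars.isspace d = false := fun d hd => htsp d (by simp [hd])
      have hlast : PySem.Chars.isspace (cs.getLastD c) = false := by
        rcases List.mem_cons.1 (List.getLastD_mem_cons : cs.getLastD c ∈ c :: cs) with h | h
        · rw [h]; exact hc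
        · exact hcs _ h
      have hjoinA : (PySem.Str.join " " (PySem.Str.split₀ text)).toList
          = c :: (cs ++ sepTail ts) := by
        rw [PySem.Str.toList_join, PySem.Str.split₀_map_toList, htss,
          show (" ":String).toList = [' '] from by decide, join_space, List.cons_append]
      rw [hjoinA, loop_start]
      rw [hsplit, htss, List.map_cons, List.foldl_cons,
        show dewAddTok [] (String.ofList (c :: cs)) = [String.ofList (c :: cs)] from by
          simp [dewAddTok],
        foldl_addTok _ _ (by simp)]
      show PySem.Str.join "" _ = PySem.Str.join "" _
      simp only [PySem.Str.join]
      apply congrArg String.ofList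
      rw [show ("" : String).toList = [] from by decide, join_empty_sep, join_empty_sep,
        flatten_fix2, charFix_chunk cs c _ hc hcs,
        charFix_sepTail ts _ hlast (fun u hu => htok u (by simp [hu])),
        show cs.getLastD c :: bTailC ts = [cs.getLastD c] ++ bTailC ts from rfl,
        ← List.append_assoc, dropLast_getLastD]
      simp only [List.map_append, List.map_cons, List.flatten_append, List.flatten_cons,
        String.toList_ofList, bTail_chars]
      simp
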